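-- pv_equiv track=rewrite | github.com/eliottcassidy2000/math | 04-computation/alpha2_moment_analysis.py | enumerate_cycles
-- ===== SOURCE A (Python) =====
-- from itertools import combinations
--
-- def count_ham_cycles(A, verts):
--     k = len(verts)
--     if k == 3:
--         a, b, c = verts
--         return (A[a][b]*A[b][c]*A[c][a]) + (A[a][c]*A[c][b]*A[b][a])
--     start = 0
--     dp = {(1 << start, start): 1}
--     for mask in range(1, 1 << k):
--         if not (mask & (1 << start)):
--             continue
--         for v in range(k):
--             if not (mask & (1 << v)):
--                 continue
--             key = (mask, v)
--             if key not in dp or dp[key] == 0: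
--                 continue
--             cnt = dp[key]
--             for w in range(k):
--                 if mask & (1 << w):
--                     continue
--                 if A[verts[v]][verts[w]]:
--                     nkey = (mask | (1 << w), w)
--                     dp[nkey] = dp.get(nkey, 0) + cnt
--     full = (1 << k) - 1
--     total = 0
--     for v in range(k):
--         if v == start:
--             continue
--         key = (full, v)
--         if key in dp and dp[key] > 0:
--             if A[verts[v]][verts[start]]:
--                 total += dp[key]
--     return total
--
-- def enumerate_cycles(A, p):
--     """Return list of (frozenset_of_vertices, multiplicity) for all directed odd cycles."""
--     cycles = []
--     for k in range(3, p + 1, 2):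
--         for subset in combinations(range(p), k):
--             verts = list(subset)
--             n_cyc = count_ham_cycles(A, verts)
--             for _ in range(n_cyc):
--                 cycles.append(frozenset(subset))
--     return cycles
-- ===== SOURCE B (Python) =====
-- from itertools import combinations
--
-- def enumerate_cycles(A, p):
--     """Return list of (frozenset_of_vertices, multiplicity) for all directed odd cycles."""
--     if p < 3:
--         return []
--     # One global Held-Karp pass over all p-bit masks, instead of re-running a DP for
--     # every subset: dp[(mask, v)] = number of simple paths (edges = nonzero entries of
--     # A) that start at the minimum vertex of mask, visit exactly the vertices of mask,
--     # and end at v.  Extending only to vertices above the minimum keeps the start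
--     # vertex of every stored path equal to min(mask).
--     dp = {}
--     for s in range(p):
--         dp[(1 << s, s)] = 1
--     for mask in range(1, 1 << p):
--         s = 0
--         while not (mask >> s) & 1:
--             s += 1
--         for v in range(p):
--             if not (mask >> v) & 1:
--                 continue
--             c = dp.get((mask, v), 0)
--             if c == 0:
--                 continue
--             for w in range(s + 1, p):
--                 if (mask >> w) & 1:
--                     continue
--                 if A[v][w]:
--                     key = (mask | (1 << w), w)
--                     dp[key] = dp.get(key, 0) + c
--     out = []
--     for k in range(3, p + 1, 2):
--         for subset in combinations(range(p), k):
--             if k == 3: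
--                 a, b, c = subset
--                 n = A[a][b]*A[b][c]*A[c][a] + A[a][c]*A[c][b]*A[b][a]
--             else:
--                 s = subset[0]
--                 mask = 0
--                 for x in subset:
--                     mask |= 1 << x
--                 n = 0
--                 for v in subset[1:]:
--                     if A[v][s]:
--                         n += dp.get((mask, v), 0)
--             out.extend([frozenset(subset)] * n)
--     return out
-- ===== Notes on version B (the rewrite author's own statement) =====
-- stated objective: faster
-- what changed: Instead of re-running a fresh per-subset Held-Karp DP for every odd vertex subset, B runs one global bitmask Held-Karp DP over all p-bit masks (fixing the minimum vertex of each mask as the path start), and each subset's directed-cycle count is then read off that single table in O(k); the k==3 closed-form product branch of A is kept.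
import Mathlib
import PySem

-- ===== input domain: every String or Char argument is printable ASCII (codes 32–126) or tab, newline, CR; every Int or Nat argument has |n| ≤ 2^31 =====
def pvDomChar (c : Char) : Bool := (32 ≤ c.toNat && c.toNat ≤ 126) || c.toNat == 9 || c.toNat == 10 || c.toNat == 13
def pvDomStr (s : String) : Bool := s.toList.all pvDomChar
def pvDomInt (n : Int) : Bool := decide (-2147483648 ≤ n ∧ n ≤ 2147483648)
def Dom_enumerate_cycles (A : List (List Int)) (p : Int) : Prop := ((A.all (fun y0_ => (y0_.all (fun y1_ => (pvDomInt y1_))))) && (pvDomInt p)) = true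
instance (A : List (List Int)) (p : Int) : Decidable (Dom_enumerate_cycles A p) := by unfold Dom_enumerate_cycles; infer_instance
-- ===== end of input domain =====

-- B replaces A's per-subset Held-Karp DP (re-run for every odd subset) by ONE global bitmask
-- DP with the minimum vertex of each mask fixed as path start; each subset's directed-cycle
-- count is then read off that single table.


-- matrix access A[i][j], total form (Pre_ keeps every access in range where Python A returns)
def pvEntry (A : List (List Int)) (i j : Int) : Int :=
  PySem.List.pyGetD (PySem.List.pyGetD A i []) j 0

-- ===== PORT A =====
-- innermost 'for w in range(k)' of count_ham_cycles's DP
def pvChcExt (A : List (List Int)) (verts : List Int) (k : Nat) (mask v : Nat) (cnt : Int)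
    (dp : PySem.Dict (Nat × Nat) Int) : PySem.Dict (Nat × Nat) Int :=
  (List.range k).foldl (fun dp w =>
    if mask &&& (1 <<< w) ≠ 0 then dp
    else if pvEntry A (verts.getD v 0) (verts.getD w 0) ≠ 0 then
      dp.insert (mask ||| (1 <<< w), w) (dp.getD (mask ||| (1 <<< w), w) 0 + cnt)
    else dp) dp

-- one iteration of 'for mask in range(1, 1 << k)'
def pvChcMask (A : List (List Int)) (verts : List Int) (k : Nat) (mask : Nat)
    (dp : PySem.Dict (Nat × Nat) Int) : PySem.Dict (Nat × Nat) Int :=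
  if mask &&& (1 <<< 0) = 0 then dp
  else (List.range k).foldl (fun dp v =>
    if mask &&& (1 <<< v) = 0 then dp
    else match dp.get? (mask, v) with
      | none => dp
      | some cnt => if cnt = 0 then dp else pvChcExt A verts k mask v cnt dp) dp

def count_ham_cycles (A : List (List Int)) (verts : List Int) : Int :=
  let k := verts.length
  if k = 3 then
    let a := verts.getD 0 0
    let b := verts.getD 1 0
    let c := verts.getD 2 0
    pvEntry A a b * pvEntry A b c * pvEntry A c a + pvEntry A a c * pvEntry A c b * pvEntry A b a
  else
    let dp0 := (PySem.Dict.empty : PySem.Dict (Nat × Nat) Int).insert (1 <<< 0, 0) 1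
    let dp := (List.range' 1 (2 ^ k - 1)).foldl (fun dp mask => pvChcMask A verts k mask dp) dp0
    let full := 2 ^ k - 1
    (List.range k).foldl (fun total v =>
      if v = 0 then total
      else match dp.get? (full, v) with
        | none => total
        | some c =>
          if c > 0 then (if pvEntry A (verts.getD v 0) (verts.getD 0 0) ≠ 0 then total + c else total)
          else total) 0

def enumerate_cycles (A : List (List Int)) (p : Int) : List (List Int) :=
  (PySem.List.pyRange 3 (p + 1) 2).foldl (fun cycles k =>
    (PySem.List.combinations (PySem.List.pyRange 0 p 1) k.toNat).foldl (fun cycles subset =>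
      let n := count_ham_cycles A subset
      cycles ++ List.replicate n.toNat (PySem.Set.ofList subset)) cycles) []

-- ===== PORT B =====
-- 'while not (mask >> s) & 1: s += 1' — fuel-bounded scan; exact whenever mask has a set
-- bit among the first `fuel` positions at or above s (always the case here: 1 ≤ mask < 2^p)
def pvLow (mask : Nat) : Nat → Nat → Nat
  | s, 0 => s
  | s, fuel + 1 => if (mask >>> s) &&& 1 = 1 then s else pvLow mask (s + 1) fuel

-- innermost 'for w in range(s + 1, p)'
def pvAltExt (A : List (List Int)) (pN : Nat) (mask s v : Nat) (c : Int)
    (dp : PySem.Dict (Nat × Nat) Int) : PySem.Dict (Nat × Nat) Int :=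
  (List.range' (s + 1) (pN - (s + 1))).foldl (fun dp w =>
    if (mask >>> w) &&& 1 = 1 then dp
    else if pvEntry A (v : Int) (w : Int) ≠ 0 then
      dp.insert (mask ||| (1 <<< w), w) (dp.getD (mask ||| (1 <<< w), w) 0 + c)
    else dp) dp

-- one iteration of the global 'for mask in range(1, 1 << p)'
def pvAltMask (A : List (List Int)) (pN : Nat) (mask : Nat)
    (dp : PySem.Dict (Nat × Nat) Int) : PySem.Dict (Nat × Nat) Int :=
  let s := pvLow mask 0 pN
  (List.range pN).foldl (fun dp v =>
    if (mask >>> v) &&& 1 = 0 then dp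
    else
      let c := dp.getD (mask, v) 0
      if c = 0 then dp else pvAltExt A pN mask s v c dp) dp

def pvMaskOf (subset : List Int) : Nat :=
  subset.foldl (fun m x => m ||| (1 <<< x.toNat)) 0

-- 'n = 0; for v in subset[1:]: if A[v][s]: n += dp.get((mask, v), 0)'
def pvCloseSum (A : List (List Int)) (dp : PySem.Dict (Nat × Nat) Int) (subset : List Int) : Int :=
  let s := subset.getD 0 0
  let mask := pvMaskOf subset
  (subset.drop 1).foldl (fun n v => if pvEntry A v s ≠ 0 then n + dp.getD (mask, v.toNat) 0 else n) 0

def enumerate_cycles_alt (A : List (List Int)) (p : Int) : List (List Int) :=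
  if p < 3 then []
  else
    let pN := p.toNat
    let dp0 := (List.range pN).foldl (fun d s => d.insert ((1 <<< s : Nat), s) (1 : Int))
      (PySem.Dict.empty : PySem.Dict (Nat × Nat) Int)
    let dp := (List.range' 1 (2 ^ pN - 1)).foldl (fun dp mask => pvAltMask A pN mask dp) dp0
    (PySem.List.pyRange 3 (p + 1) 2).foldl (fun out k =>
      (PySem.List.combinations (PySem.List.pyRange 0 p 1) k.toNat).foldl (fun out subset =>
        let n :=
          if k = 3 then
            let a := subset.getD 0 0
            let b := subset.getD 1 0
            let c := subset.getD 2 0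
            pvEntry A a b * pvEntry A b c * pvEntry A c a + pvEntry A a c * pvEntry A c b * pvEntry A b a
          else pvCloseSum A dp subset
        out ++ PySem.List.pyRepeat [PySem.Set.ofList subset] n) out) []

-- ===== PRECONDITION & SPEC =====
-- Exactly the inputs on which Python A returns: for p ≥ 3 it reads A[i][j] for every
-- pair i ≠ j < p (and nothing else), so every row i < p-1 needs p columns while the
-- last row, i = p-1, only needs p-1; for p < 3 nothing is read.
def Pre_enumerate_cycles (A : List (List Int)) (p : Int) : Prop :=
  p < 3 ∨ (p.toNat ≤ A.length ∧
    ∀ i < p.toNat, p.toNat - (if i = p.toNat - 1 then 1 else 0) ≤ (A.getD i []).length)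
instance (A : List (List Int)) (p : Int) : Decidable (Pre_enumerate_cycles A p) := by
  unfold Pre_enumerate_cycles; infer_instance

def pvWitness_enumerate_cycles : List (List Int) × Int := ([[0, 1, 1], [1, 0, 1], [1, 1, 0]], 3)

def Spec_enumerate_cycles (A : List (List Int)) (p : Int) (out : List (List Int)) : Prop :=
  out = enumerate_cycles_alt A p
instance (A : List (List Int)) (p : Int) (out : List (List Int)) : Decidable (Spec_enumerate_cycles A p out) := by
  unfold Spec_enumerate_cycles; infer_instance

-- ===== CLAIM (what is proved, stated in full; the proofs are below) =====
def Claim_equal_enumerate_cycles : Prop := ∀ (A : List (List Int)) (p : Int), Dom_enumerate_cycles A p → Pre_enumerate_cycles A p → Spec_enumerate_cycles A p (enumerate_cycles A p)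

-- ===== LEMMAS AND PROOFS =====

-- bit-twiddling facts used by both invariant proofs
theorem pvXorLt (m v : Nat) (h : m.testBit v = true) : m ^^^ 2 ^ v < m := by
  apply Nat.lt_of_testBit v
  · simp [Nat.testBit_xor, h]
  · exact h
  · intro j hj; simp [Nat.testBit_xor, Nat.ne_of_lt hj]
theorem pvTestXor (m v u : Nat) : (m ^^^ 2 ^ v).testBit u = ((m.testBit u).xor (decide (v = u))) := by
  simp [Nat.testBit_xor, Nat.testBit_two_pow]
theorem pvTestOr (m w u : Nat) : (m ||| 2 ^ w).testBit u = (m.testBit u || decide (w = u)) := by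
  simp [Nat.testBit_or, Nat.testBit_two_pow]
theorem pvOrXor (m w : Nat) (h : m.testBit w = false) : (m ||| 2 ^ w) ^^^ 2 ^ w = m := by
  apply Nat.eq_of_testBit_eq; intro u
  by_cases hu : w = u
  · subst hu; simp [h]
  · simp [hu]
theorem pvAndShiftZero (mask w : Nat) : (mask &&& (1 <<< w) = 0) ↔ mask.testBit w = false := by
  rw [Nat.shiftLeft_eq, one_mul, Nat.and_two_pow]
  cases h : mask.testBit w <;> simp
theorem pvShiftAnd (mask w : Nat) : (mask >>> w) &&& 1 = (mask.testBit w).toNat := by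
  have h1 : (mask >>> w) &&& 1 = (mask >>> w) &&& 2 ^ 0 := by norm_num
  rw [h1, Nat.and_two_pow, Nat.testBit_shiftRight]
  simp
theorem pvXorTest (m v : Nat) (h : m.testBit v = true) : (m ^^^ 2 ^ v).testBit v = false := by
  simp [h]

-- pvG adj n s mask v = number of simple paths that start at s, visit exactly the
-- vertices in `mask` (bit positions), and end at v; the common value of both DPs.
def pvG (adj : Nat → Nat → Bool) (n s mask v : Nat) : Int :=
  if h : mask.testBit v = true then
    if mask = 2 ^ s ∧ v = s then 1
    else if v = s then 0
    else ((List.range n).map (fun u =>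
      if ((mask ^^^ 2 ^ v).testBit u && adj u v) = true then pvG adj n s (mask ^^^ 2 ^ v) u else 0)).sum
  else 0
termination_by mask
decreasing_by exact pvXorLt mask v h

theorem pvG_nonneg (adj : Nat → Nat → Bool) (n s mask v : Nat) : 0 ≤ pvG adj n s mask v := by
  induction mask using Nat.strong_induction_on generalizing v with
  | _ mask ih =>
    rw [pvG]
    split
    · rename_i h
      split
      · norm_num
      · split
        · norm_num
        · apply List.sum_nonneg
          intro x hx
          simp only [List.mem_map] at hx
          obtain ⟨u, _, rfl⟩ := hx
          split
          · exact ih _ (pvXorLt mask v h) u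
          · exact le_refl 0
    · exact le_refl 0

theorem pvXorEqOr (mask v : Nat) (h : mask.testBit v = false) : mask ^^^ 2 ^ v = mask ||| 2 ^ v := by
  apply Nat.eq_of_testBit_eq; intro u
  by_cases hu : v = u
  · subst hu; simp [h]
  · simp [hu]

-- canonical form of both innermost extension loops
def pvStep (mask : Nat) (Q : Nat → Bool) (c : Int) (dp : PySem.Dict (Nat × Nat) Int) (w : Nat) :
    PySem.Dict (Nat × Nat) Int :=
  if mask.testBit w = true then dp
  else if Q w = true then dp.insert (mask ||| 2 ^ w, w) (dp.getD (mask ||| 2 ^ w, w) 0 + c)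
  else dp

theorem pvStepFold_getD (l : List Nat) (hnd : l.Nodup) (mask : Nat) (Q : Nat → Bool) (c : Int)
    (dp : PySem.Dict (Nat × Nat) Int) (m v : Nat) :
    (l.foldl (pvStep mask Q c) dp).getD (m, v) 0 =
      dp.getD (m, v) 0 +
        (if v ∈ l ∧ mask.testBit v = false ∧ Q v = true ∧ m = mask ||| 2 ^ v then c else 0) := by
  revert hnd
  induction l generalizing dp with
  | nil => intro _; simp
  | cons w t ih =>
    intro hnd
    have hw : w ∉ t := (List.nodup_cons.mp hnd).1
    have hndt : t.Nodup := (List.nodup_cons.mp hnd).2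
    rw [List.foldl_cons, ih _ hndt]
    unfold pvStep
    by_cases hbit : mask.testBit w = true
    · rw [if_pos hbit]
      by_cases hv : v = w
      · subst hv
        simp [hbit]
      · have : (v ∈ w :: t ∧ mask.testBit v = false ∧ Q v = true ∧ m = mask ||| 2 ^ v)
             ↔ (v ∈ t ∧ mask.testBit v = false ∧ Q v = true ∧ m = mask ||| 2 ^ v) := by
          simp [List.mem_cons, hv]
        simp only [this]
    · rw [if_neg hbit]
      replace hbit : mask.testBit w = false := by simpa using hbit
      by_cases hQ : Q w = true
      · rw [if_pos hQ]
        rw [PySem.Dict.getD_insert]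
        by_cases hv : v = w
        · subst hv
          by_cases hm : m = mask ||| 2 ^ v
          · subst hm
            simp [hbit, hQ, hw]
          · rw [if_neg (by simp [hm]), if_neg (by tauto), if_neg (by simp [List.mem_cons, hw]; tauto)]
        · rw [if_neg (by simp [hv])]
          have : (v ∈ w :: t ∧ mask.testBit v = false ∧ Q v = true ∧ m = mask ||| 2 ^ v)
               ↔ (v ∈ t ∧ mask.testBit v = false ∧ Q v = true ∧ m = mask ||| 2 ^ v) := by
            simp [List.mem_cons, hv]
          simp only [this]
      · rw [if_neg hQ]
        by_cases hv : v = w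
        · subst hv
          simp [hQ]
        · have : (v ∈ w :: t ∧ mask.testBit v = false ∧ Q v = true ∧ m = mask ||| 2 ^ v)
               ↔ (v ∈ t ∧ mask.testBit v = false ∧ Q v = true ∧ m = mask ||| 2 ^ v) := by
            simp [List.mem_cons, hv]
          simp only [this]

-- unfolding equations for pvG in usable form
theorem pvG_base (adj : Nat → Nat → Bool) (n s : Nat) : pvG adj n s (2 ^ s) s = 1 := by
  rw [pvG]; simp
theorem pvG_not_test (adj : Nat → Nat → Bool) (n s m v : Nat) (h : m.testBit v = false) :
    pvG adj n s m v = 0 := by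
  rw [pvG]; simp [h]
theorem pvG_start (adj : Nat → Nat → Bool) (n s m : Nat) (h : m ≠ 2 ^ s) : pvG adj n s m s = 0 := by
  rw [pvG]; simp [h]

-- partial contribution sum (u ranges over the first V vertices)
def pvPS (adj : Nat → Nat → Bool) (n s mask V v : Nat) : Int :=
  ((List.range V).map (fun u => if (mask.testBit u && adj u v) = true then pvG adj n s mask u else 0)).sum

theorem pvG_rec (adj : Nat → Nat → Bool) (n s m v : Nat) (hv : m.testBit v = true) (hvs : v ≠ s) :
    pvG adj n s m v = pvPS adj n s (m ^^^ 2 ^ v) n v := by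
  rw [pvG]; simp [hv, hvs, pvPS]

theorem pvPS_succ (adj : Nat → Nat → Bool) (n s mask V v : Nat) :
    pvPS adj n s mask (V + 1) v =
      pvPS adj n s mask V v +
        (if (mask.testBit V && adj V v) = true then pvG adj n s mask V else 0) := by
  unfold pvPS; rw [List.range_succ]; simp

theorem pvShiftOne (w : Nat) : (1 <<< w : Nat) = 2 ^ w := by simp [Nat.shiftLeft_eq]

theorem pvAndPowZero (mask w : Nat) : (mask &&& 2 ^ w = 0) ↔ mask.testBit w = false := by
  rw [Nat.and_two_pow]
  cases h : mask.testBit w <;> simp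

def pvAdjA (A : List (List Int)) (verts : List Int) (u v : Nat) : Bool :=
  decide (pvEntry A (verts.getD u 0) (verts.getD v 0) ≠ 0)

-- dictionary model of A's DP after masks 1..M have been processed
def pvMA (adj : Nat → Nat → Bool) (k M m v : Nat) : Int :=
  if (m = 1 ∧ v = 0) ∨
     (v ≠ 0 ∧ v < k ∧ m.testBit v = true ∧ m.testBit 0 = true ∧ m ^^^ 2 ^ v ≤ M)
  then pvG adj k 0 m v else 0

theorem pvMA_read (adj : Nat → Nat → Bool) (k mask V : Nat) (hV : V < k)
    (hb : mask.testBit V = true) (hb0 : mask.testBit 0 = true) :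
    pvMA adj k (mask - 1) mask V = pvG adj k 0 mask V := by
  by_cases hV0 : V = 0
  · subst hV0
    by_cases hm : mask = 1
    · subst hm; simp [pvMA]
    · have h2 : ¬((mask = 1 ∧ (0:Nat) = 0) ∨
        ((0:Nat) ≠ 0 ∧ 0 < k ∧ mask.testBit 0 = true ∧ mask.testBit 0 = true ∧ mask ^^^ 2 ^ 0 ≤ mask - 1)) := by
        simp [hm]
      rw [pvMA, if_neg h2, pvG_start adj k 0 mask (by simpa using hm)]
  · have hle : mask ^^^ 2 ^ V ≤ mask - 1 := by
      have := pvXorLt mask V hb; omega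
    rw [pvMA, if_pos (Or.inr ⟨hV0, hV, hb, hb0, hle⟩)]

-- model in the middle of processing `mask` (the first V vertices already expanded)
def pvMidA (adj : Nat → Nat → Bool) (k mask V m v : Nat) : Int :=
  pvMA adj k (mask - 1) m v +
    (if v ≠ 0 ∧ v < k ∧ mask.testBit v = false ∧ m = mask ||| 2 ^ v
     then pvPS adj k 0 mask V v else 0)

theorem pvMidA_zero (adj : Nat → Nat → Bool) (k mask m v : Nat) :
    pvMidA adj k mask 0 m v = pvMA adj k (mask - 1) m v := by
  simp [pvMidA, pvPS]

theorem pvMidA_done (adj : Nat → Nat → Bool) (k mask : Nat) (hb0 : mask.testBit 0 = true)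
    (h1 : 1 ≤ mask) (m v : Nat) : pvMidA adj k mask k m v = pvMA adj k mask m v := by
  by_cases hr : v ≠ 0 ∧ v < k ∧ mask.testBit v = false ∧ m = mask ||| 2 ^ v
  · obtain ⟨hv0, hvk, hbv, hm⟩ := hr
    have hmv : m.testBit v = true := by
      subst hm; rw [pvTestOr]; simp
    have hm0 : m.testBit 0 = true := by
      subst hm; rw [pvTestOr, hb0, Bool.true_or]
    have hxor : m ^^^ 2 ^ v = mask := by subst hm; exact pvOrXor mask v hbv
    have hold : pvMA adj k (mask - 1) m v = 0 := by
      rw [pvMA, if_neg]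
      rintro (⟨h1', h2'⟩ | ⟨a, b, c, d, e⟩)
      · exact hv0 h2'
      · rw [hxor] at e; omega
    have hnew : pvMA adj k mask m v = pvG adj k 0 m v := by
      rw [pvMA, if_pos (Or.inr ⟨hv0, hvk, hmv, hm0, by rw [hxor]⟩)]
    rw [pvMidA, hold, hnew, if_pos ⟨hv0, hvk, hbv, hm⟩, zero_add,
      pvG_rec adj k 0 m v hmv hv0, hxor]
  · have heq : pvMA adj k (mask - 1) m v = pvMA adj k mask m v := by
      unfold pvMA
      by_cases hc : (m = 1 ∧ v = 0) ∨
          (v ≠ 0 ∧ v < k ∧ m.testBit v = true ∧ m.testBit 0 = true ∧ m ^^^ 2 ^ v ≤ mask - 1)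
      · rw [if_pos hc, if_pos]
        rcases hc with h | ⟨a, b, c, d, e⟩
        · exact Or.inl h
        · exact Or.inr ⟨a, b, c, d, by omega⟩
      · rw [if_neg hc, if_neg]
        rintro (h | ⟨a, b, c, d, e⟩)
        · exact hc (Or.inl h)
        · by_cases he : m ^^^ 2 ^ v ≤ mask - 1
          · exact hc (Or.inr ⟨a, b, c, d, he⟩)
          · have hx : m ^^^ 2 ^ v = mask := by omega
            have hbv : mask.testBit v = false := by
              rw [← hx, pvTestXor, c]; simp
            have hm : m = mask ||| 2 ^ v := by
              rw [← pvXorEqOr mask v hbv, ← hx, Nat.xor_assoc]; simp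
            exact hr ⟨a, b, hbv, hm⟩
    rw [pvMidA, heq, if_neg hr, add_zero]

-- 'if key not in dp or dp[key] == 0' read as one dp.getD access
theorem pvMatchDict (d : PySem.Dict (Nat × Nat) Int) (key : Nat × Nat)
    (X : PySem.Dict (Nat × Nat) Int) (F : Int → PySem.Dict (Nat × Nat) Int) :
    (match d.get? key with
      | none => X
      | some cnt => if cnt = 0 then X else F cnt) =
    if d.getD key 0 = 0 then X else F (d.getD key 0) := by
  rw [PySem.Dict.getD_eq_get?_getD]
  cases h : d.get? key with
  | none => simp
  | some cnt => simp

-- canonical form of A's per-vertex middle-loop body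
def pvBodyA (A : List (List Int)) (verts : List Int) (k mask : Nat)
    (dp : PySem.Dict (Nat × Nat) Int) (v : Nat) : PySem.Dict (Nat × Nat) Int :=
  if mask.testBit v = false then dp
  else if dp.getD (mask, v) 0 = 0 then dp
  else (List.range k).foldl (pvStep mask (fun w => pvAdjA A verts v w) (dp.getD (mask, v) 0)) dp

theorem pvChcExt_eq (A : List (List Int)) (verts : List Int) (k mask v : Nat) (cnt : Int)
    (dp : PySem.Dict (Nat × Nat) Int) :
    pvChcExt A verts k mask v cnt dp =
      (List.range k).foldl (pvStep mask (fun w => pvAdjA A verts v w) cnt) dp := by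
  unfold pvChcExt
  apply PySem.List.foldl_congr_mem
  intro dp' w _
  simp only [pvShiftOne]
  unfold pvStep pvAdjA
  by_cases hbw : mask.testBit w = true
  · rw [if_pos (show mask &&& 2 ^ w ≠ 0 by rw [Ne, pvAndPowZero, hbw]; simp),
      if_pos (show ((mask.testBit w) = true) from hbw)]
  · replace hbw : mask.testBit w = false := by simpa using hbw
    rw [if_neg (show ¬(mask &&& 2 ^ w ≠ 0) by rw [Ne, pvAndPowZero, hbw]; simp),
      if_neg (show ¬(mask.testBit w = true) by rw [hbw]; simp)]
    by_cases hq : pvEntry A (verts.getD v 0) (verts.getD w 0) ≠ 0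
    · rw [if_pos hq, if_pos (show decide (pvEntry A (verts.getD v 0) (verts.getD w 0) ≠ 0) = true by simpa using hq)]
    · rw [if_neg hq, if_neg (show ¬(decide (pvEntry A (verts.getD v 0) (verts.getD w 0) ≠ 0) = true) by simpa using hq)]

theorem pvBodyA_eq (A : List (List Int)) (verts : List Int) (k mask : Nat)
    (dp : PySem.Dict (Nat × Nat) Int) (v : Nat) :
    (if mask &&& (1 <<< v) = 0 then dp
     else match dp.get? (mask, v) with
       | none => dp
       | some cnt => if cnt = 0 then dp else pvChcExt A verts k mask v cnt dp) =
    pvBodyA A verts k mask dp v := by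
  unfold pvBodyA
  by_cases hb : mask.testBit v = true
  · rw [if_neg (show ¬(mask &&& (1 <<< v) = 0) by rw [pvAndShiftZero, hb]; simp),
      if_neg (show ¬(mask.testBit v = false) by rw [hb]; simp),
      pvMatchDict dp (mask, v) dp (fun cnt => pvChcExt A verts k mask v cnt dp)]
    by_cases hc : dp.getD (mask, v) 0 = 0
    · rw [if_pos hc, if_pos hc]
    · rw [if_neg hc, if_neg hc, pvChcExt_eq]
  · replace hb : mask.testBit v = false := by simpa using hb
    rw [if_pos (show mask &&& (1 <<< v) = 0 by rw [pvAndShiftZero, hb]), if_pos (show mask.testBit v = false from hb)]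

theorem pvMidFoldA (A : List (List Int)) (verts : List Int) (k mask : Nat)
    (hb0 : mask.testBit 0 = true) (V : Nat) (hV : V ≤ k)
    (dp : PySem.Dict (Nat × Nat) Int)
    (hdp : ∀ m v, dp.getD (m, v) 0 = pvMidA (pvAdjA A verts) k mask 0 m v) :
    ∀ m v, ((List.range V).foldl (pvBodyA A verts k mask) dp).getD (m, v) 0 =
      pvMidA (pvAdjA A verts) k mask V m v := by
  induction V with
  | zero => simpa using hdp
  | succ V ih =>
    have hVk : V < k := hV
    have ihV := ih (by omega)
    rw [List.range_succ, List.foldl_append, List.foldl_cons, List.foldl_nil]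
    set dp1 := (List.range V).foldl (pvBodyA A verts k mask) dp with hdp1
    intro m v
    unfold pvBodyA
    by_cases hbv : mask.testBit V = true
    · rw [if_neg (show ¬(mask.testBit V = false) by rw [hbv]; simp)]
      have hread : dp1.getD (mask, V) 0 = pvG (pvAdjA A verts) k 0 mask V := by
        rw [ihV mask V]
        unfold pvMidA
        rw [if_neg (show ¬(V ≠ 0 ∧ V < k ∧ mask.testBit V = false ∧ mask = mask ||| 2 ^ V) by
          rintro ⟨-, -, hf, -⟩; rw [hbv] at hf; exact absurd hf (by simp)), add_zero]
        exact pvMA_read (pvAdjA A verts) k mask V hVk hbv hb0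
      by_cases hc : dp1.getD (mask, V) 0 = 0
      · rw [if_pos hc, ihV m v]
        unfold pvMidA
        rw [pvPS_succ]
        have hz : (if (mask.testBit V && pvAdjA A verts V v) = true
            then pvG (pvAdjA A verts) k 0 mask V else 0) = 0 := by
          split
          · rw [← hread, hc]
          · rfl
        rw [hz, add_zero]
      · rw [if_neg hc, pvStepFold_getD (List.range k) List.nodup_range mask _ _ dp1 m v, ihV m v]
        unfold pvMidA
        rw [pvPS_succ, hread]
        by_cases hr : v ≠ 0 ∧ v < k ∧ mask.testBit v = false ∧ m = mask ||| 2 ^ v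
        · rw [if_pos hr, if_pos hr]
          obtain ⟨hv0, hvk, hbvv, hm⟩ := hr
          by_cases ha : pvAdjA A verts V v = true
          · rw [if_pos (show v ∈ List.range k ∧ mask.testBit v = false ∧ pvAdjA A verts V v = true ∧ m = mask ||| 2 ^ v by
                exact ⟨List.mem_range.mpr hvk, hbvv, ha, hm⟩),
              if_pos (show (mask.testBit V && pvAdjA A verts V v) = true by rw [hbv, ha]; rfl)]
            ring
          · rw [if_neg (show ¬(v ∈ List.range k ∧ mask.testBit v = false ∧ pvAdjA A verts V v = true ∧ m = mask ||| 2 ^ v) by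
                rintro ⟨-, -, hf, -⟩; exact ha hf),
              if_neg (show ¬((mask.testBit V && pvAdjA A verts V v) = true) by
                rw [hbv]; simpa using ha), add_zero]
            ring
        · rw [if_neg hr, if_neg hr,
            if_neg (show ¬(v ∈ List.range k ∧ mask.testBit v = false ∧ pvAdjA A verts V v = true ∧ m = mask ||| 2 ^ v) by
              rintro ⟨h1, h2, h3, h4⟩
              rw [List.mem_range] at h1
              by_cases hv0 : v = 0
              · subst hv0; rw [hb0] at h2; exact absurd h2 (by simp)
              · exact hr ⟨hv0, h1, h2, h4⟩)]
          ring
    · replace hbv : mask.testBit V = false := by simpa using hbv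
      rw [if_pos (show mask.testBit V = false from hbv), ihV m v]
      unfold pvMidA
      rw [pvPS_succ]
      have hz : (if (mask.testBit V && pvAdjA A verts V v) = true
          then pvG (pvAdjA A verts) k 0 mask V else 0) = 0 := by
        rw [hbv]; simp
      rw [hz, add_zero]

theorem pvChcMask_step (A : List (List Int)) (verts : List Int) (k mask : Nat) (h1 : 1 ≤ mask)
    (dp : PySem.Dict (Nat × Nat) Int)
    (hInv : ∀ m v, dp.getD (m, v) 0 = pvMA (pvAdjA A verts) k (mask - 1) m v) :
    ∀ m v, (pvChcMask A verts k mask dp).getD (m, v) 0 = pvMA (pvAdjA A verts) k mask m v := by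
  unfold pvChcMask
  by_cases hb0 : mask.testBit 0 = true
  · rw [if_neg (show ¬(mask &&& (1 <<< 0) = 0) by rw [pvAndShiftZero, hb0]; simp)]
    have hcong : (List.range k).foldl (fun dp v =>
        if mask &&& (1 <<< v) = 0 then dp
        else match dp.get? (mask, v) with
          | none => dp
          | some cnt => if cnt = 0 then dp else pvChcExt A verts k mask v cnt dp) dp
        = (List.range k).foldl (pvBodyA A verts k mask) dp := by
      apply PySem.List.foldl_congr_mem
      intro d v _
      exact pvBodyA_eq A verts k mask d v
    rw [hcong]
    intro m v
    rw [pvMidFoldA A verts k mask hb0 k le_rfl dp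
      (fun m v => (hInv m v).trans (pvMidA_zero (pvAdjA A verts) k mask m v).symm) m v]
    exact pvMidA_done (pvAdjA A verts) k mask hb0 h1 m v
  · replace hb0 : mask.testBit 0 = false := by simpa using hb0
    rw [if_pos (show mask &&& (1 <<< 0) = 0 by rw [pvAndShiftZero, hb0])]
    intro m v
    rw [hInv m v]
    unfold pvMA
    by_cases hc : (m = 1 ∧ v = 0) ∨
        (v ≠ 0 ∧ v < k ∧ m.testBit v = true ∧ m.testBit 0 = true ∧ m ^^^ 2 ^ v ≤ mask - 1)
    · rw [if_pos hc, if_pos]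
      rcases hc with h | ⟨a, b, c, d, e⟩
      · exact Or.inl h
      · exact Or.inr ⟨a, b, c, d, by omega⟩
    · rw [if_neg hc, if_neg]
      rintro (h | ⟨a, b, c, d, e⟩)
      · exact hc (Or.inl h)
      · by_cases he : m ^^^ 2 ^ v ≤ mask - 1
        · exact hc (Or.inr ⟨a, b, c, d, he⟩)
        · have hx : m ^^^ 2 ^ v = mask := by omega
          have : mask.testBit 0 = true := by
            rw [← hx, pvTestXor, d]
            have : decide (v = 0) = false := by simpa using a
            rw [this]; rfl
          rw [hb0] at this; exact absurd this (by simp)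

theorem pvMA_init (adj : Nat → Nat → Bool) (k m v : Nat) :
    pvMA adj k 0 m v = if (m, v) = ((1 : Nat), (0 : Nat)) then 1 else 0 := by
  by_cases h : (m, v) = ((1 : Nat), (0 : Nat))
  · rw [if_pos h]
    obtain ⟨hm, hv⟩ := Prod.mk.injEq .. ▸ h
    have hm' : m = 1 := by simpa using congrArg Prod.fst h
    have hv' : v = 0 := by simpa using congrArg Prod.snd h
    subst hm'; subst hv'
    rw [pvMA, if_pos (Or.inl ⟨rfl, rfl⟩)]
    have : (1 : Nat) = 2 ^ 0 := rfl
    rw [this, pvG_base]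
  · rw [if_neg h, pvMA, if_neg]
    rintro (⟨hm, hv⟩ | ⟨a, b, c, d, e⟩)
    · exact h (by rw [hm, hv])
    · have hx : m ^^^ 2 ^ v = 0 := by omega
      have hm2 : m = 2 ^ v := by
        have := Nat.xor_eq_zero_iff.mp hx; exact this
      have : m.testBit 0 = decide (v = 0) := by
        rw [hm2, Nat.testBit_two_pow]
      rw [d] at this
      have hv0 : v = 0 := by simpa using this.symm
      exact a hv0

theorem pvDPA (A : List (List Int)) (verts : List Int) (k : Nat) (n : Nat) :
    ∀ m v, ((List.range' 1 n).foldl (fun dp mask => pvChcMask A verts k mask dp)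
      ((PySem.Dict.empty : PySem.Dict (Nat × Nat) Int).insert (1 <<< 0, 0) 1)).getD (m, v) 0
      = pvMA (pvAdjA A verts) k n m v := by
  induction n with
  | zero =>
    intro m v
    show ((PySem.Dict.empty : PySem.Dict (Nat × Nat) Int).insert (1 <<< 0, 0) 1).getD (m, v) 0 = _
    rw [PySem.Dict.getD_insert, pvMA_init]
    by_cases h : (m, v) = ((1 : Nat), (0 : Nat))
    · rw [if_pos h, if_pos (by simpa using h)]
    · rw [if_neg h, if_neg (by simpa using h), PySem.Dict.getD_empty]
  | succ n ih =>
    intro m v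
    rw [List.range'_concat, List.foldl_append, List.foldl_cons, List.foldl_nil]
    simp only [one_mul]
    have hstep := pvChcMask_step A verts k (1 + n) (by omega) _
      (fun m v => by rw [show (1 + n) - 1 = n from by omega]; exact ih m v) m v
    rw [hstep, show 1 + n = n + 1 from by omega]

theorem pvTotalStep (d : PySem.Dict (Nat × Nat) Int) (key : Nat × Nat) (P : Prop) [Decidable P] (t : Int) :
    (match d.get? key with
      | none => t
      | some c => if c > 0 then (if P then t + c else t) else t) =
    if 0 < d.getD key 0 ∧ P then t + d.getD key 0 else t := by
  rw [PySem.Dict.getD_eq_get?_getD]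
  cases h : d.get? key with
  | none => simp
  | some c =>
    simp only [Option.getD_some]
    by_cases hc : c > 0
    · by_cases hp : P
      · rw [if_pos hc, if_pos hp, if_pos ⟨hc, hp⟩]
      · rw [if_pos hc, if_neg hp, if_neg (by rintro ⟨-, h2⟩; exact hp h2)]
    · rw [if_neg hc, if_neg (by rintro ⟨h1, -⟩; exact hc h1)]

theorem pvCountHam_eq (A : List (List Int)) (verts : List Int) (h3 : verts.length ≠ 3) :
    count_ham_cycles A verts =
      ((List.range verts.length).map (fun v =>
        if (decide (v ≠ 0) && pvAdjA A verts v 0) = true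
        then pvG (pvAdjA A verts) verts.length 0 (2 ^ verts.length - 1) v else 0)).sum := by
  rw [count_ham_cycles]
  simp only [if_neg h3]
  set k := verts.length with hk
  set dpF := (List.range' 1 (2 ^ k - 1)).foldl (fun dp mask => pvChcMask A verts k mask dp)
    ((PySem.Dict.empty : PySem.Dict (Nat × Nat) Int).insert (1 <<< 0, 0) 1) with hdpF
  have hInv := pvDPA A verts k (2 ^ k - 1)
  have hcong : (List.range k).foldl (fun total v =>
      if v = 0 then total
      else match dpF.get? (2 ^ k - 1, v) with
        | none => total
        | some c =>
          if c > 0 then (if pvEntry A (verts.getD v 0) (verts.getD 0 0) ≠ 0 then total + c else total)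
          else total) 0
      = (List.range k).foldl (fun total v => total +
          (if (decide (v ≠ 0) && pvAdjA A verts v 0) = true
           then pvG (pvAdjA A verts) k 0 (2 ^ k - 1) v else 0)) 0 := by
    apply PySem.List.foldl_congr_mem
    intro t v hv
    rw [List.mem_range] at hv
    by_cases hv0 : v = 0
    · subst hv0
      rw [if_pos rfl, if_neg (by simp), add_zero]
    · rw [if_neg hv0, pvTotalStep dpF (2 ^ k - 1, v) _ t, hInv (2 ^ k - 1) v]
      have hguard : pvMA (pvAdjA A verts) k (2 ^ k - 1) (2 ^ k - 1) v
          = pvG (pvAdjA A verts) k 0 (2 ^ k - 1) v := by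
        have htv : (2 ^ k - 1).testBit v = true := by
          rw [Nat.testBit_two_pow_sub_one]; simpa using hv
        have ht0 : (2 ^ k - 1).testBit 0 = true := by
          rw [Nat.testBit_two_pow_sub_one]; simp; omega
        have hle : (2 ^ k - 1) ^^^ 2 ^ v ≤ 2 ^ k - 1 := le_of_lt (pvXorLt _ v htv)
        rw [pvMA, if_pos (Or.inr ⟨hv0, hv, htv, ht0, hle⟩)]
      rw [hguard]
      by_cases hp : pvEntry A (verts.getD v 0) (verts.getD 0 0) ≠ 0
      · have hadj : pvAdjA A verts v 0 = true := by simpa [pvAdjA] using hp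
        by_cases hpos : 0 < pvG (pvAdjA A verts) k 0 (2 ^ k - 1) v
        · rw [if_pos ⟨hpos, hp⟩, if_pos (by rw [hadj]; simpa using hv0)]
        · have hz : pvG (pvAdjA A verts) k 0 (2 ^ k - 1) v = 0 :=
            le_antisymm (by omega) (pvG_nonneg ..)
          rw [if_neg (by rintro ⟨h1, -⟩; exact hpos h1), hz]
          split <;> ring
      · have hadj : pvAdjA A verts v 0 = false := by simpa [pvAdjA] using hp
        rw [if_neg (by rintro ⟨-, h2⟩; exact hp h2), if_neg (by rw [hadj]; simp), add_zero]
  rw [hcong, PySem.List.foldl_add, zero_add]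

theorem pvTestBitFalseOfLt (m k u : Nat) (h : m < 2 ^ k) (hu : k ≤ u) : m.testBit u = false :=
  Nat.testBit_lt_two_pow (lt_of_lt_of_le h (Nat.pow_le_pow_right (by norm_num) hu))

-- least set bit
def pvLowBit (m : Nat) : Nat :=
  if m % 2 = 1 ∨ m ≤ 1 then 0 else pvLowBit (m / 2) + 1
termination_by m
decreasing_by omega

theorem pvLowBit_test (m : Nat) (h : 1 ≤ m) : m.testBit (pvLowBit m) = true := by
  induction m using Nat.strong_induction_on with
  | _ m ih =>
    rw [pvLowBit]
    by_cases hc : m % 2 = 1 ∨ m ≤ 1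
    · rw [if_pos hc, Nat.testBit_zero]
      rcases hc with h1 | h1
      · simpa using h1
      · have : m = 1 := by omega
        subst this; simp
    · rw [if_neg hc, Nat.testBit_succ]
      exact ih (m / 2) (by omega) (by omega)

theorem pvLowBit_min (m : Nat) (i : Nat) (hi : i < pvLowBit m) : m.testBit i = false := by
  induction m using Nat.strong_induction_on generalizing i with
  | _ m ih =>
    rw [pvLowBit] at hi
    by_cases hc : m % 2 = 1 ∨ m ≤ 1
    · rw [if_pos hc] at hi; omega
    · rw [if_neg hc] at hi
      cases i with
      | zero => rw [Nat.testBit_zero]; simp; omega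
      | succ j =>
        rw [Nat.testBit_succ]
        exact ih (m / 2) (by omega) j (by omega)

theorem pvLowBit_eq (m t : Nat) (h1 : m.testBit t = true) (h2 : ∀ i < t, m.testBit i = false) :
    pvLowBit m = t := by
  have hm : 1 ≤ m := by
    rcases Nat.eq_zero_or_pos m with h | h
    · subst h; simp at h1
    · exact h
  rcases Nat.lt_trichotomy (pvLowBit m) t with h | h | h
  · have := pvLowBit_test m hm
    rw [h2 _ h] at this; exact absurd this (by simp)
  · exact h
  · rw [pvLowBit_min m t h] at h1; exact absurd h1 (by simp)

theorem pvLowBit_pow (v : Nat) : pvLowBit (2 ^ v) = v := by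
  apply pvLowBit_eq
  · simp
  · intro i hi
    rw [Nat.testBit_two_pow]
    simp; omega

theorem pvLowBit_lt (m pN : Nat) (h1 : 1 ≤ m) (h2 : m < 2 ^ pN) : pvLowBit m < pN := by
  by_contra hc
  have := pvLowBit_test m h1
  rw [pvTestBitFalseOfLt m pN _ h2 (by omega)] at this
  exact absurd this (by simp)

theorem pvLowBit_or (mask v : Nat) (h1 : 1 ≤ mask) (hv : pvLowBit mask < v) :
    pvLowBit (mask ||| 2 ^ v) = pvLowBit mask := by
  apply pvLowBit_eq
  · rw [pvTestOr, pvLowBit_test mask h1, Bool.true_or]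
  · intro i hi
    rw [pvTestOr, pvLowBit_min mask i hi]
    simp; omega

theorem pvLowBit_or_lt (mask v : Nat) (_h1 : 1 ≤ mask) (hv : v < pvLowBit mask) :
    pvLowBit (mask ||| 2 ^ v) = v := by
  apply pvLowBit_eq
  · rw [pvTestOr]; simp
  · intro i hi
    rw [pvTestOr, pvLowBit_min mask i (by omega)]
    simp; omega

theorem pvLow_aux (mask : Nat) (fuel s : Nat) (hle : s ≤ pvLowBit mask)
    (hlt : pvLowBit mask < s + fuel) (hm : 1 ≤ mask) : pvLow mask s fuel = pvLowBit mask := by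
  induction fuel generalizing s with
  | zero => omega
  | succ fuel ih =>
    show (if (mask >>> s) &&& 1 = 1 then s else pvLow mask (s + 1) fuel) = pvLowBit mask
    by_cases hbs : mask.testBit s = true
    · have hs : pvLowBit mask = s := by
        rcases Nat.lt_or_ge s (pvLowBit mask) with h | h
        · rw [pvLowBit_min mask s h] at hbs; exact absurd hbs (by simp)
        · omega
      rw [if_pos (by rw [pvShiftAnd, hbs]; rfl), hs]
    · replace hbs : mask.testBit s = false := by simpa using hbs
      have hne : pvLowBit mask ≠ s := by
        intro he; rw [← he] at hbs; rw [pvLowBit_test mask hm] at hbs; exact absurd hbs (by simp)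
      rw [if_neg (by rw [pvShiftAnd, hbs]; simp)]
      exact ih (s + 1) (by omega) (by omega)

theorem pvLow_eq (mask pN : Nat) (h1 : 1 ≤ mask) (h2 : mask < 2 ^ pN) :
    pvLow mask 0 pN = pvLowBit mask :=
  pvLow_aux mask pN 0 (by omega) (by simpa using pvLowBit_lt mask pN h1 h2) h1

def pvAdjB (A : List (List Int)) (u v : Nat) : Bool :=
  decide (pvEntry A (u : Int) (v : Int) ≠ 0)

-- dictionary model of B's global DP after masks 1..M have been processed
def pvMB (A : List (List Int)) (pN M m v : Nat) : Int :=
  if (m = 2 ^ v ∧ v < pN) ∨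
     (v ≠ pvLowBit m ∧ v < pN ∧ m.testBit v = true ∧ m ^^^ 2 ^ v ≤ M)
  then pvG (pvAdjB A) pN (pvLowBit m) m v else 0

theorem pvMB_read (A : List (List Int)) (pN mask V : Nat) (hV : V < pN)
    (hb : mask.testBit V = true) :
    pvMB A pN (mask - 1) mask V = pvG (pvAdjB A) pN (pvLowBit mask) mask V := by
  by_cases hV0 : V = pvLowBit mask
  · by_cases hm : mask = 2 ^ V
    · rw [pvMB, if_pos (Or.inl ⟨hm, hV⟩)]
    · rw [pvMB, if_neg, ← hV0, pvG_start]
      · rw [hV0]; exact fun he => hm (by rw [he, hV0])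
      · rintro (⟨h1', h2'⟩ | ⟨a, b, c, d⟩)
        · exact hm h1'
        · exact a hV0
  · have hle : mask ^^^ 2 ^ V ≤ mask - 1 := by
      have := pvXorLt mask V hb; omega
    rw [pvMB, if_pos (Or.inr ⟨hV0, hV, hb, hle⟩)]

-- model in the middle of processing `mask` in B's loop
def pvMidB (A : List (List Int)) (pN mask V m v : Nat) : Int :=
  pvMB A pN (mask - 1) m v +
    (if pvLowBit mask < v ∧ v < pN ∧ mask.testBit v = false ∧ m = mask ||| 2 ^ v
     then pvPS (pvAdjB A) pN (pvLowBit mask) mask V v else 0)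

theorem pvMidB_zero (A : List (List Int)) (pN mask m v : Nat) :
    pvMidB A pN mask 0 m v = pvMB A pN (mask - 1) m v := by
  simp [pvMidB, pvPS]

theorem pvMidB_done (A : List (List Int)) (pN mask : Nat) (h1 : 1 ≤ mask) (m v : Nat) :
    pvMidB A pN mask pN m v = pvMB A pN mask m v := by
  by_cases hr : pvLowBit mask < v ∧ v < pN ∧ mask.testBit v = false ∧ m = mask ||| 2 ^ v
  · obtain ⟨hsv, hvp, hbv, hm⟩ := hr
    have hmv : m.testBit v = true := by
      subst hm; rw [pvTestOr]; simp
    have hlow : pvLowBit m = pvLowBit mask := by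
      subst hm; exact pvLowBit_or mask v h1 hsv
    have hxor : m ^^^ 2 ^ v = mask := by subst hm; exact pvOrXor mask v hbv
    have hvne : v ≠ pvLowBit m := by rw [hlow]; omega
    have hm2 : m ≠ 2 ^ v := by
      intro he
      have : pvLowBit m = v := by rw [he, pvLowBit_pow]
      exact hvne (by rw [this])
    have hold : pvMB A pN (mask - 1) m v = 0 := by
      rw [pvMB, if_neg]
      rintro (⟨h1', h2'⟩ | ⟨a, b, c, d⟩)
      · exact hm2 h1'
      · rw [hxor] at d; omega
    have hnew : pvMB A pN mask m v = pvG (pvAdjB A) pN (pvLowBit m) m v := by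
      rw [pvMB, if_pos (Or.inr ⟨hvne, hvp, hmv, by rw [hxor]⟩)]
    rw [pvMidB, hold, hnew, if_pos ⟨hsv, hvp, hbv, hm⟩, zero_add,
      pvG_rec (pvAdjB A) pN (pvLowBit m) m v hmv hvne, hxor, hlow]
  · have heq : pvMB A pN (mask - 1) m v = pvMB A pN mask m v := by
      unfold pvMB
      by_cases hc : (m = 2 ^ v ∧ v < pN) ∨
          (v ≠ pvLowBit m ∧ v < pN ∧ m.testBit v = true ∧ m ^^^ 2 ^ v ≤ mask - 1)
      · rw [if_pos hc, if_pos]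
        rcases hc with h | ⟨a, b, c, d⟩
        · exact Or.inl h
        · exact Or.inr ⟨a, b, c, by omega⟩
      · rw [if_neg hc, if_neg]
        rintro (h | ⟨a, b, c, d⟩)
        · exact hc (Or.inl h)
        · by_cases he : m ^^^ 2 ^ v ≤ mask - 1
          · exact hc (Or.inr ⟨a, b, c, he⟩)
          · have hx : m ^^^ 2 ^ v = mask := by omega
            have hbv : mask.testBit v = false := by
              rw [← hx, pvTestXor, c]; simp
            have hm : m = mask ||| 2 ^ v := by
              rw [← pvXorEqOr mask v hbv, ← hx, Nat.xor_assoc]; simp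
            have hmask1 : 1 ≤ mask := h1
            rcases Nat.lt_trichotomy v (pvLowBit mask) with hlt | heq' | hgt
            · have : pvLowBit m = v := by rw [hm]; exact pvLowBit_or_lt mask v hmask1 hlt
              exact a this.symm
            · subst heq'
              rw [pvLowBit_test mask hmask1] at hbv
              exact absurd hbv (by simp)
            · exact hr ⟨hgt, b, hbv, hm⟩
    rw [pvMidB, heq, if_neg hr, add_zero]

-- canonical form of B's per-vertex middle-loop body
def pvBodyB (A : List (List Int)) (pN mask s : Nat)
    (dp : PySem.Dict (Nat × Nat) Int) (v : Nat) : PySem.Dict (Nat × Nat) Int :=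
  if mask.testBit v = false then dp
  else if dp.getD (mask, v) 0 = 0 then dp
  else (List.range' (s + 1) (pN - (s + 1))).foldl
    (pvStep mask (fun w => pvAdjB A v w) (dp.getD (mask, v) 0)) dp

theorem pvAltExt_eq (A : List (List Int)) (pN mask s v : Nat) (c : Int)
    (dp : PySem.Dict (Nat × Nat) Int) :
    pvAltExt A pN mask s v c dp =
      (List.range' (s + 1) (pN - (s + 1))).foldl (pvStep mask (fun w => pvAdjB A v w) c) dp := by
  unfold pvAltExt
  apply PySem.List.foldl_congr_mem
  intro dp' w _
  simp only [pvShiftOne]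
  unfold pvStep pvAdjB
  by_cases hbw : mask.testBit w = true
  · rw [if_pos (show (mask >>> w) &&& 1 = 1 by rw [pvShiftAnd, hbw]; rfl),
      if_pos (show ((mask.testBit w) = true) from hbw)]
  · replace hbw : mask.testBit w = false := by simpa using hbw
    rw [if_neg (show ¬((mask >>> w) &&& 1 = 1) by rw [pvShiftAnd, hbw]; simp),
      if_neg (show ¬(mask.testBit w = true) by rw [hbw]; simp)]
    by_cases hq : pvEntry A (v : Int) (w : Int) ≠ 0
    · rw [if_pos hq, if_pos (show decide (pvEntry A (v : Int) (w : Int) ≠ 0) = true by simpa using hq)]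
    · rw [if_neg hq, if_neg (show ¬(decide (pvEntry A (v : Int) (w : Int) ≠ 0) = true) by simpa using hq)]

theorem pvBodyB_eq (A : List (List Int)) (pN mask s : Nat)
    (dp : PySem.Dict (Nat × Nat) Int) (v : Nat) :
    (if (mask >>> v) &&& 1 = 0 then dp
     else
       let c := dp.getD (mask, v) 0
       if c = 0 then dp else pvAltExt A pN mask s v c dp) =
    pvBodyB A pN mask s dp v := by
  unfold pvBodyB
  by_cases hb : mask.testBit v = true
  · rw [if_neg (show ¬((mask >>> v) &&& 1 = 0) by rw [pvShiftAnd, hb]; simp),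
      if_neg (show ¬(mask.testBit v = false) by rw [hb]; simp)]
    show (if dp.getD (mask, v) 0 = 0 then dp else pvAltExt A pN mask s v (dp.getD (mask, v) 0) dp) = _
    by_cases hc : dp.getD (mask, v) 0 = 0
    · rw [if_pos hc, if_pos hc]
    · rw [if_neg hc, if_neg hc, pvAltExt_eq]
  · replace hb : mask.testBit v = false := by simpa using hb
    rw [if_pos (show (mask >>> v) &&& 1 = 0 by rw [pvShiftAnd, hb]; rfl),
      if_pos (show mask.testBit v = false from hb)]

theorem pvMidFoldB (A : List (List Int)) (pN mask : Nat) (_h1 : 1 ≤ mask)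
    (V : Nat) (hV : V ≤ pN)
    (dp : PySem.Dict (Nat × Nat) Int)
    (hdp : ∀ m v, dp.getD (m, v) 0 = pvMidB A pN mask 0 m v) :
    ∀ m v, ((List.range V).foldl (pvBodyB A pN mask (pvLowBit mask)) dp).getD (m, v) 0 =
      pvMidB A pN mask V m v := by
  induction V with
  | zero => simpa using hdp
  | succ V ih =>
    have hVp : V < pN := hV
    have ihV := ih (by omega)
    rw [List.range_succ, List.foldl_append, List.foldl_cons, List.foldl_nil]
    set dp1 := (List.range V).foldl (pvBodyB A pN mask (pvLowBit mask)) dp with hdp1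
    intro m v
    unfold pvBodyB
    by_cases hbv : mask.testBit V = true
    · rw [if_neg (show ¬(mask.testBit V = false) by rw [hbv]; simp)]
      have hread : dp1.getD (mask, V) 0 = pvG (pvAdjB A) pN (pvLowBit mask) mask V := by
        rw [ihV mask V]
        unfold pvMidB
        rw [if_neg (show ¬(pvLowBit mask < V ∧ V < pN ∧ mask.testBit V = false ∧ mask = mask ||| 2 ^ V) by
          rintro ⟨-, -, hf, -⟩; rw [hbv] at hf; exact absurd hf (by simp)), add_zero]
        exact pvMB_read A pN mask V hVp hbv
      by_cases hc : dp1.getD (mask, V) 0 = 0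
      · rw [if_pos hc, ihV m v]
        unfold pvMidB
        rw [pvPS_succ]
        have hz : (if (mask.testBit V && pvAdjB A V v) = true
            then pvG (pvAdjB A) pN (pvLowBit mask) mask V else 0) = 0 := by
          split
          · rw [← hread, hc]
          · rfl
        rw [hz, add_zero]
      · rw [if_neg hc,
          pvStepFold_getD (List.range' (pvLowBit mask + 1) (pN - (pvLowBit mask + 1)))
            (List.nodup_range' ..) mask _ _ dp1 m v, ihV m v]
        unfold pvMidB
        rw [pvPS_succ, hread]
        by_cases hr : pvLowBit mask < v ∧ v < pN ∧ mask.testBit v = false ∧ m = mask ||| 2 ^ v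
        · rw [if_pos hr, if_pos hr]
          obtain ⟨hsv, hvp, hbvv, hm⟩ := hr
          by_cases ha : pvAdjB A V v = true
          · rw [if_pos (show v ∈ List.range' (pvLowBit mask + 1) (pN - (pvLowBit mask + 1)) ∧
                mask.testBit v = false ∧ pvAdjB A V v = true ∧ m = mask ||| 2 ^ v by
                refine ⟨List.mem_range'_1.mpr ⟨by omega, by omega⟩, hbvv, ha, hm⟩),
              if_pos (show (mask.testBit V && pvAdjB A V v) = true by rw [hbv, ha]; rfl)]
            ring
          · rw [if_neg (show ¬(v ∈ List.range' (pvLowBit mask + 1) (pN - (pvLowBit mask + 1)) ∧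
                mask.testBit v = false ∧ pvAdjB A V v = true ∧ m = mask ||| 2 ^ v) by
                rintro ⟨-, -, hf, -⟩; exact ha hf),
              if_neg (show ¬((mask.testBit V && pvAdjB A V v) = true) by
                rw [hbv]; simpa using ha), add_zero]
            ring
        · rw [if_neg hr, if_neg hr,
            if_neg (show ¬(v ∈ List.range' (pvLowBit mask + 1) (pN - (pvLowBit mask + 1)) ∧
              mask.testBit v = false ∧ pvAdjB A V v = true ∧ m = mask ||| 2 ^ v) by
              rintro ⟨hmem, h2, h3, h4⟩
              rw [List.mem_range'_1] at hmem
              exact hr ⟨by omega, by omega, h2, h4⟩)]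
          ring
    · replace hbv : mask.testBit V = false := by simpa using hbv
      rw [if_pos (show mask.testBit V = false from hbv), ihV m v]
      unfold pvMidB
      rw [pvPS_succ]
      have hz : (if (mask.testBit V && pvAdjB A V v) = true
          then pvG (pvAdjB A) pN (pvLowBit mask) mask V else 0) = 0 := by
        rw [hbv]; simp
      rw [hz, add_zero]

theorem pvSeeds (pN : Nat) : ∀ m v,
    ((List.range pN).foldl (fun d s => d.insert ((1 <<< s : Nat), s) (1 : Int))
      (PySem.Dict.empty : PySem.Dict (Nat × Nat) Int)).getD (m, v) 0
    = if m = 2 ^ v ∧ v < pN then 1 else 0 := by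
  induction pN with
  | zero =>
    intro m v
    rw [if_neg (by rintro ⟨-, h⟩; omega)]
    simp
  | succ n ih =>
    intro m v
    rw [List.range_succ, List.foldl_append, List.foldl_cons, List.foldl_nil]
    simp only [pvShiftOne]
    simp only [pvShiftOne] at ih
    rw [PySem.Dict.getD_insert]
    by_cases hv : v = n
    · subst hv
      by_cases hm : m = 2 ^ v
      · rw [if_pos (by rw [hm]), if_pos ⟨hm, by omega⟩]
      · rw [if_neg (by simp [hm]), ih m v, if_neg (by rintro ⟨-, h⟩; omega),
          if_neg (by rintro ⟨h, -⟩; exact hm h)]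
    · rw [if_neg (by simp [hv]), ih m v]
      by_cases hc : m = 2 ^ v ∧ v < n
      · rw [if_pos hc, if_pos ⟨hc.1, by omega⟩]
      · rw [if_neg hc, if_neg (by rintro ⟨a, b⟩; exact hc ⟨a, by omega⟩)]

theorem pvMB_init (A : List (List Int)) (pN m v : Nat) :
    pvMB A pN 0 m v = if m = 2 ^ v ∧ v < pN then 1 else 0 := by
  by_cases h : m = 2 ^ v ∧ v < pN
  · rw [if_pos h, pvMB, if_pos (Or.inl h), h.1, pvLowBit_pow, pvG_base]
  · rw [if_neg h, pvMB, if_neg]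
    rintro (h' | ⟨a, b, c, d⟩)
    · exact h h'
    · have hx : m ^^^ 2 ^ v = 0 := by omega
      have hm2 : m = 2 ^ v := Nat.xor_eq_zero_iff.mp hx
      exact a (by rw [hm2, pvLowBit_pow])

theorem pvAltMask_step (A : List (List Int)) (pN mask : Nat)
    (dp : PySem.Dict (Nat × Nat) Int) (h1 : 1 ≤ mask) (h2 : mask < 2 ^ pN)
    (hInv : ∀ m v, dp.getD (m, v) 0 = pvMB A pN (mask - 1) m v) :
    ∀ m v, (pvAltMask A pN mask dp).getD (m, v) 0 = pvMB A pN mask m v := by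
  unfold pvAltMask
  rw [pvLow_eq mask pN h1 h2]
  have hcong : (List.range pN).foldl (fun dp v =>
      if (mask >>> v) &&& 1 = 0 then dp
      else
        let c := dp.getD (mask, v) 0
        if c = 0 then dp else pvAltExt A pN mask (pvLowBit mask) v c dp) dp
      = (List.range pN).foldl (pvBodyB A pN mask (pvLowBit mask)) dp := by
    apply PySem.List.foldl_congr_mem
    intro d v _
    exact pvBodyB_eq A pN mask (pvLowBit mask) d v
  rw [hcong]
  intro m v
  rw [pvMidFoldB A pN mask h1 pN le_rfl dp
    (fun m v => (hInv m v).trans (pvMidB_zero A pN mask m v).symm) m v]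
  exact pvMidB_done A pN mask h1 m v

theorem pvDPB (A : List (List Int)) (pN n : Nat) (hn : n ≤ 2 ^ pN - 1) :
    ∀ m v, ((List.range' 1 n).foldl (fun dp mask => pvAltMask A pN mask dp)
      ((List.range pN).foldl (fun d s => d.insert ((1 <<< s : Nat), s) (1 : Int))
        (PySem.Dict.empty : PySem.Dict (Nat × Nat) Int))).getD (m, v) 0
    = pvMB A pN n m v := by
  induction n with
  | zero =>
    intro m v
    rw [pvMB_init]
    exact pvSeeds pN m v
  | succ n ih =>
    intro m v
    rw [List.range'_concat, List.foldl_append, List.foldl_cons, List.foldl_nil]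
    simp only [one_mul]
    have h2 : 1 + n < 2 ^ pN := by
      have : 1 ≤ 2 ^ pN := Nat.one_le_two_pow
      omega
    have hstep := pvAltMask_step A pN (1 + n) _ (by omega) h2
      (fun m v => by rw [show (1 + n) - 1 = n from by omega]; exact ih (by omega) m v) m v
    rw [hstep, show 1 + n = n + 1 from by omega]

theorem pvGetD_lt (l : List Nat) (i : Nat) (h : i < l.length) : l.getD i 0 = l[i] := by
  simp [List.getD_eq_getElem?_getD, List.getElem?_eq_getElem h]

theorem pvGetD_mem (l : List Nat) (i : Nat) (h : i < l.length) : l.getD i 0 ∈ l := by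
  rw [pvGetD_lt l i h]; exact List.getElem_mem h

theorem pvVN_mono (vN : List Nat) (hso : vN.Pairwise (· < ·)) (i j : Nat)
    (hij : i < j) (hj : j < vN.length) : vN.getD i 0 < vN.getD j 0 := by
  rw [pvGetD_lt vN i (by omega), pvGetD_lt vN j hj]
  exact List.pairwise_iff_getElem.mp hso i j (by omega) hj hij

theorem pvVN_inj (vN : List Nat) (hso : vN.Pairwise (· < ·)) (i j : Nat)
    (hi : i < vN.length) (hj : j < vN.length) (h : vN.getD i 0 = vN.getD j 0) : i = j := by
  rcases Nat.lt_trichotomy i j with hlt | he | hgt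
  · have := pvVN_mono vN hso i j hlt hj; omega
  · exact he
  · have := pvVN_mono vN hso j i hgt hi; omega

theorem pvG_congr (adj adj' : Nat → Nat → Bool) (n s : Nat)
    (h : ∀ u w, u < n → w < n → adj u w = adj' u w) :
    ∀ mask v, v < n → pvG adj n s mask v = pvG adj' n s mask v := by
  intro mask
  induction mask using Nat.strong_induction_on with
  | _ mask ih =>
    intro v hv
    rw [pvG, pvG]
    by_cases hb : mask.testBit v = true
    · rw [dif_pos hb, dif_pos hb]
      by_cases h1 : mask = 2 ^ s ∧ v = s
      · rw [if_pos h1, if_pos h1]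
      · rw [if_neg h1, if_neg h1]
        by_cases h2 : v = s
        · rw [if_pos h2, if_pos h2]
        · rw [if_neg h2, if_neg h2]
          congr 1
          apply List.map_congr_left
          intro u hu
          rw [List.mem_range] at hu
          rw [h u v hu hv]
          split
          · exact ih _ (pvXorLt mask v hb) u hu
          · rfl
    · rw [dif_neg hb, dif_neg hb]

-- bit set built by or-ing elements
theorem pvFoldOrTest (l : List Nat) (m0 x : Nat) :
    ((l.foldl (fun m y => m ||| 2 ^ y) m0).testBit x) = (m0.testBit x || decide (x ∈ l)) := by
  induction l generalizing m0 with
  | nil => simp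
  | cons y t ih =>
    rw [List.foldl_cons, ih, pvTestOr]
    by_cases hx : x ∈ t
    · simp [hx]
    · by_cases hxy : y = x
      · subst hxy; simp
      · simp [hx, hxy, Ne.symm hxy]

def pvMapM (vN : List Nat) (mask : Nat) : Nat :=
  (List.range vN.length).foldl
    (fun acc i => if mask.testBit i = true then acc ||| 2 ^ (vN.getD i 0) else acc) 0

theorem pvMapM_aux (vN : List Nat) (mask : Nat) (n : Nat) (acc x : Nat) :
    (((List.range n).foldl
      (fun acc i => if mask.testBit i = true then acc ||| 2 ^ (vN.getD i 0) else acc) acc).testBit x = true)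
    ↔ (acc.testBit x = true ∨ ∃ i, i < n ∧ mask.testBit i = true ∧ vN.getD i 0 = x) := by
  induction n generalizing acc with
  | zero => simp
  | succ n ih =>
    rw [List.range_succ, List.foldl_append, List.foldl_cons, List.foldl_nil]
    by_cases hb : mask.testBit n = true
    · rw [if_pos hb, pvTestOr, Bool.or_eq_true, ih]
      constructor
      · rintro ((h | ⟨i, hi, h2, h3⟩) | h)
        · exact Or.inl h
        · exact Or.inr ⟨i, by omega, h2, h3⟩
        · exact Or.inr ⟨n, by omega, hb, by simpa using h⟩
      · rintro (h | ⟨i, hi, h2, h3⟩)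
        · exact Or.inl (Or.inl h)
        · by_cases hin : i = n
          · subst hin; exact Or.inr (by simpa using h3)
          · exact Or.inl (Or.inr ⟨i, by omega, h2, h3⟩)
    · rw [if_neg hb, ih]
      constructor
      · rintro (h | ⟨i, hi, h2, h3⟩)
        · exact Or.inl h
        · exact Or.inr ⟨i, by omega, h2, h3⟩
      · rintro (h | ⟨i, hi, h2, h3⟩)
        · exact Or.inl h
        · by_cases hin : i = n
          · subst hin; rw [h2] at hb; exact absurd rfl hb
          · exact Or.inr ⟨i, by omega, h2, h3⟩

theorem pvMapM_test (vN : List Nat) (mask x : Nat) :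
    ((pvMapM vN mask).testBit x = true)
    ↔ ∃ i, i < vN.length ∧ mask.testBit i = true ∧ vN.getD i 0 = x := by
  rw [pvMapM, pvMapM_aux]
  simp

theorem pvMapM_xor (vN : List Nat) (hso : vN.Pairwise (· < ·)) (mask v : Nat)
    (hv : v < vN.length) (hb : mask.testBit v = true) :
    pvMapM vN (mask ^^^ 2 ^ v) = pvMapM vN mask ^^^ 2 ^ (vN.getD v 0) := by
  apply Nat.eq_of_testBit_eq
  intro x
  by_cases hx : vN.getD v 0 = x
  · have hL : (pvMapM vN (mask ^^^ 2 ^ v)).testBit x = false := by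
      by_contra hc
      replace hc : (pvMapM vN (mask ^^^ 2 ^ v)).testBit x = true := by
        cases hd : (pvMapM vN (mask ^^^ 2 ^ v)).testBit x
        · exact absurd hd hc
        · rfl
      obtain ⟨i, hi, h2, h3⟩ := (pvMapM_test ..).mp hc
      have hiv : i = v := pvVN_inj vN hso i v hi hv (by rw [h3, hx])
      subst hiv
      rw [pvXorTest mask i hb] at h2
      exact absurd h2 (by simp)
    have hR : (pvMapM vN mask).testBit x = true := (pvMapM_test ..).mpr ⟨v, hv, hb, hx⟩
    rw [pvTestXor, hL, hR, show decide (vN.getD v 0 = x) = true from by simpa using hx]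
    rfl
  · have hdec : decide (vN.getD v 0 = x) = false := by simpa using hx
    rw [pvTestXor, hdec, Bool.xor_false, Bool.eq_iff_iff, pvMapM_test, pvMapM_test]
    constructor
    · rintro ⟨i, hi, h2, h3⟩
      have hiv : i ≠ v := fun he => hx (by rw [← h3, he])
      rw [pvTestXor, show decide (v = i) = false from by simpa using (Ne.symm hiv), Bool.xor_false] at h2
      exact ⟨i, hi, h2, h3⟩
    · rintro ⟨i, hi, h2, h3⟩
      have hiv : i ≠ v := fun he => hx (by rw [← h3, he])
      refine ⟨i, hi, ?_, h3⟩
      rw [pvTestXor, show decide (v = i) = false from by simpa using (Ne.symm hiv), Bool.xor_false]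
      exact h2

theorem pvMapRange (l : List Nat) (F : Nat → Int) :
    (l.map F) = (List.range l.length).map (fun i => F (l.getD i 0)) := by
  apply List.ext_getElem
  · simp
  · intro i h1 h2
    have hi : i < l.length := by simpa using h1
    simp [List.getD_eq_getElem?_getD, List.getElem?_eq_getElem hi]

theorem pvSumReindex (vN : List Nat) (pN : Nat) (hso : vN.Pairwise (· < ·))
    (hlt : ∀ x ∈ vN, x < pN) (F : Nat → Int) (h0 : ∀ x, x ∉ vN → F x = 0) :
    ((List.range pN).map F).sum = ((List.range vN.length).map (fun i => F (vN.getD i 0))).sum := by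
  have hnd : vN.Nodup := List.Pairwise.imp (fun h => Nat.ne_of_lt h) hso
  have h1 : ((List.range pN).map F).sum = ∑ x ∈ Finset.range pN, F x := rfl
  have hsub : vN.toFinset ⊆ Finset.range pN := by
    intro x hx
    rw [Finset.mem_range]
    exact hlt x (List.mem_toFinset.mp hx)
  have h2 : ∑ x ∈ Finset.range pN, F x = ∑ x ∈ vN.toFinset, F x := by
    refine (Finset.sum_subset hsub ?_).symm
    intro x _ hx
    exact h0 x (fun hmem => hx (List.mem_toFinset.mpr hmem))
  rw [h1, h2, List.sum_toFinset F hnd, pvMapRange vN F]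

theorem pvBridge (A : List (List Int)) (vN : List Nat) (pN : Nat)
    (hso : vN.Pairwise (· < ·)) (hlt : ∀ x ∈ vN, x < pN) :
    ∀ mask, mask < 2 ^ vN.length → ∀ v, v < vN.length →
      pvG (fun u w => pvAdjB A (vN.getD u 0) (vN.getD w 0)) vN.length 0 mask v
        = pvG (pvAdjB A) pN (vN.getD 0 0) (pvMapM vN mask) (vN.getD v 0) := by
  have hF1 : ∀ mk j, j < vN.length → (pvMapM vN mk).testBit (vN.getD j 0) = mk.testBit j := by
    intro mk j hj
    rw [Bool.eq_iff_iff, pvMapM_test]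
    constructor
    · rintro ⟨i, hi, h2, h3⟩
      have hij : i = j := pvVN_inj vN hso i j hi hj h3
      rw [← hij]; exact h2
    · intro h
      exact ⟨j, hj, h, rfl⟩
  intro mask
  induction mask using Nat.strong_induction_on with
  | _ mask ih =>
    intro hmask v hv
    by_cases hb : mask.testBit v = true
    · by_cases hbase : mask = 2 ^ 0 ∧ v = 0
      · obtain ⟨hm1, hv0⟩ := hbase
        subst hm1; subst hv0
        have hmap : pvMapM vN (2 ^ 0) = 2 ^ (vN.getD 0 0) := by
          apply Nat.eq_of_testBit_eq
          intro x
          rw [Bool.eq_iff_iff, pvMapM_test, Nat.testBit_two_pow]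
          constructor
          · rintro ⟨i, hi, h2, h3⟩
            rw [Nat.testBit_two_pow] at h2
            have h0i : 0 = i := of_decide_eq_true h2
            subst h0i
            simpa using h3
          · intro h
            exact ⟨0, hv, by simp, by simpa using h⟩
        rw [hmap, pvG_base, pvG_base]
      · by_cases hv0 : v = 0
        · subst hv0
          have hm1 : mask ≠ 2 ^ 0 := fun he => hbase ⟨he, rfl⟩
          rw [pvG_start _ vN.length 0 mask hm1]
          have hlen : 1 ≤ vN.length := by omega
          have hne : pvMapM vN mask ≠ 2 ^ (vN.getD 0 0) := by
            intro he
            apply hm1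
            apply Nat.eq_of_testBit_eq
            intro j
            rw [Nat.testBit_two_pow]
            by_cases hj : j < vN.length
            · rw [show mask.testBit j = (pvMapM vN mask).testBit (vN.getD j 0) from (hF1 mask j hj).symm,
                he, Nat.testBit_two_pow]
              by_cases hj0 : j = 0
              · subst hj0; simp
              · have hne2 : vN.getD 0 0 ≠ vN.getD j 0 := fun hee =>
                  hj0 (pvVN_inj vN hso j 0 hj (by omega) hee.symm)
                rw [show decide (vN.getD 0 0 = vN.getD j 0) = false from by simpa using hne2,
                  show decide (0 = j) = false from by simpa using (show (0:Nat) ≠ j from fun hee => hj0 hee.symm)]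
            · rw [pvTestBitFalseOfLt mask vN.length j hmask (by omega),
                show decide (0 = j) = false from by simpa using (show (0:Nat) ≠ j from by omega)]
          rw [pvG_start (pvAdjB A) pN (vN.getD 0 0) (pvMapM vN mask) hne]
        · have hvs : vN.getD v 0 ≠ vN.getD 0 0 := fun he =>
            hv0 (pvVN_inj vN hso v 0 hv (by omega) he)
          rw [pvG_rec _ vN.length 0 mask v hb hv0,
            pvG_rec (pvAdjB A) pN (vN.getD 0 0) (pvMapM vN mask) (vN.getD v 0)
              (by rw [hF1 mask v hv]; exact hb) hvs,
            ← pvMapM_xor vN hso mask v hv hb]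
          unfold pvPS
          rw [pvSumReindex vN pN hso hlt
            (fun y => if ((pvMapM vN (mask ^^^ 2 ^ v)).testBit y && pvAdjB A y (vN.getD v 0)) = true
              then pvG (pvAdjB A) pN (vN.getD 0 0) (pvMapM vN (mask ^^^ 2 ^ v)) y else 0)
            (by
              intro y hy
              show (if ((pvMapM vN (mask ^^^ 2 ^ v)).testBit y && pvAdjB A y (vN.getD v 0)) = true
                then pvG (pvAdjB A) pN (vN.getD 0 0) (pvMapM vN (mask ^^^ 2 ^ v)) y else 0) = 0
              rw [if_neg]
              intro hc
              have h1 := (Bool.and_eq_true ..).mp hc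
              obtain ⟨i, hi, -, h3⟩ := (pvMapM_test ..).mp h1.1
              exact hy (h3 ▸ pvGetD_mem vN i hi))]
          apply congrArg
          apply List.map_congr_left
          intro u hu
          rw [List.mem_range] at hu
          simp only []
          rw [hF1 (mask ^^^ 2 ^ v) u hu]
          by_cases hcond : ((mask ^^^ 2 ^ v).testBit u && pvAdjB A (vN.getD u 0) (vN.getD v 0)) = true
          · rw [if_pos hcond, if_pos hcond]
            exact ih (mask ^^^ 2 ^ v) (pvXorLt mask v hb)
              (by have := pvXorLt mask v hb; omega) u hu
          · rw [if_neg hcond, if_neg hcond]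
    · replace hb : mask.testBit v = false := by simpa using hb
      rw [pvG_not_test _ vN.length 0 mask v hb,
        pvG_not_test (pvAdjB A) pN (vN.getD 0 0) (pvMapM vN mask) (vN.getD v 0)
          (by rw [hF1 mask v hv]; exact hb)]

theorem pvGetDEl {α : Type} (l : List α) (d : α) (i : Nat) (h : i < l.length) :
    l.getD i d = l[i] := by
  simp [List.getD_eq_getElem?_getD, List.getElem?_eq_getElem h]

theorem pvMapRangeI (l : List Int) (F : Int → Int) :
    (l.map F) = (List.range l.length).map (fun i => F (l.getD i 0)) := by
  apply List.ext_getElem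
  · simp
  · intro i h1 h2
    have hi : i < l.length := by simpa using h1
    simp [List.getD_eq_getElem?_getD, List.getElem?_eq_getElem hi]

theorem pvFoldIfAdd {α : Type} (l : List α) (P : α → Prop) [DecidablePred P] (g : α → Int) (a : Int) :
    l.foldl (fun n v => if P v then n + g v else n) a
      = a + (l.map (fun v => if P v then g v else 0)).sum := by
  have h1 : l.foldl (fun n v => if P v then n + g v else n) a
      = l.foldl (fun n v => n + if P v then g v else 0) a := by
    apply PySem.List.foldl_congr_mem
    intro acc x _
    by_cases hP : P x
    · rw [if_pos hP, if_pos hP]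
    · rw [if_neg hP, if_neg hP, add_zero]
  rw [h1, PySem.List.foldl_add]

theorem pvFoldOrLt (pN : Nat) (l : List Nat) (acc : Nat) (hacc : acc < 2 ^ pN)
    (hl : ∀ x ∈ l, x < pN) : (l.foldl (fun m y => m ||| 2 ^ y) acc) < 2 ^ pN := by
  induction l generalizing acc with
  | nil => simpa using hacc
  | cons y t ih =>
    rw [List.foldl_cons]
    exact ih (acc ||| 2 ^ y)
      (Nat.or_lt_two_pow hacc
        (Nat.pow_lt_pow_right (by norm_num) (hl y (List.mem_cons_self ..))))
      (fun x hx => hl x (List.mem_cons_of_mem _ hx))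

theorem pvSubsetEq (A : List (List Int)) (p : Int) (verts : List Int)
    (hsub : verts.Sublist (PySem.List.pyRange 0 p 1)) (hk1 : 1 ≤ verts.length)
    (hk3 : verts.length ≠ 3) :
    count_ham_cycles A verts =
      pvCloseSum A
        ((List.range' 1 (2 ^ p.toNat - 1)).foldl (fun dp mask => pvAltMask A p.toNat mask dp)
          ((List.range p.toNat).foldl (fun d s => d.insert ((1 <<< s : Nat), s) (1 : Int))
            (PySem.Dict.empty : PySem.Dict (Nat × Nat) Int))) verts := by
  set dp := (List.range' 1 (2 ^ p.toNat - 1)).foldl (fun dp mask => pvAltMask A p.toNat mask dp)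
    ((List.range p.toNat).foldl (fun d s => d.insert ((1 <<< s : Nat), s) (1 : Int))
      (PySem.Dict.empty : PySem.Dict (Nat × Nat) Int)) with hdpdef
  set pN := p.toNat with hpN
  set k := verts.length with hk
  set vN := verts.map Int.toNat with hvN
  have hmem : ∀ x ∈ verts, 0 ≤ x ∧ x < p := fun x hx => by
    have h := PySem.List.mem_pyRange_one.mp (hsub.subset hx)
    exact ⟨h.1, h.2⟩
  have hlenv : vN.length = k := by simp [hvN, hk]
  have hvNget : ∀ i, i < k → vN.getD i 0 = (verts.getD i 0).toNat := by
    intro i hi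
    rw [pvGetDEl vN 0 i (by rw [hlenv]; exact hi), pvGetDEl verts 0 i hi]
    simp [hvN]
  have hcast : ∀ i, i < k → ((vN.getD i 0 : Nat) : Int) = verts.getD i 0 := by
    intro i hi
    rw [hvNget i hi]
    have hx : 0 ≤ verts.getD i 0 := by
      rw [pvGetDEl verts 0 i hi]
      exact (hmem _ (List.getElem_mem hi)).1
    omega
  have hso : vN.Pairwise (· < ·) := by
    rw [List.pairwise_iff_getElem]
    intro i j hi hj hij
    have hP : verts.Pairwise (· < ·) :=
      List.Pairwise.sublist hsub (PySem.List.pairwise_lt_pyRange_one 0 p)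
    have hi' : i < verts.length := by simpa [hvN] using hi
    have hj' : j < verts.length := by simpa [hvN] using hj
    have hlt := List.pairwise_iff_getElem.mp hP i j hi' hj' hij
    have h0 : (0:Int) ≤ verts[i] := (hmem _ (List.getElem_mem hi')).1
    simp only [hvN, List.getElem_map]
    omega
  have hltN : ∀ x ∈ vN, x < pN := by
    intro x hx
    rw [hvN] at hx
    obtain ⟨y, hy, rfl⟩ := List.mem_map.mp hx
    have := hmem y hy
    omega
  have hadj : ∀ u w, u < k → w < k →
      pvAdjA A verts u w = pvAdjB A (vN.getD u 0) (vN.getD w 0) := by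
    intro u w hu hw
    unfold pvAdjA pvAdjB
    rw [hcast u hu, hcast w hw]
  have hfold : verts.foldl (fun m y => m ||| 2 ^ y.toNat) 0 = vN.foldl (fun m y => m ||| 2 ^ y) 0 := by
    rw [hvN, List.foldl_map]
  have hmot : ∀ x, (pvMaskOf verts).testBit x = decide (x ∈ vN) := by
    intro x
    unfold pvMaskOf
    simp only [pvShiftOne]
    rw [hfold, pvFoldOrTest]
    simp
  have hk1' : 0 < vN.length := by omega
  have hmoMapM : pvMaskOf verts = pvMapM vN (2 ^ k - 1) := by
    apply Nat.eq_of_testBit_eq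
    intro x
    rw [hmot x, Bool.eq_iff_iff, pvMapM_test]
    simp only [decide_eq_true_eq]
    constructor
    · intro hx
      obtain ⟨i, hi, hie⟩ := List.mem_iff_getElem.mp hx
      refine ⟨i, hi, ?_, by rw [pvGetDEl vN 0 i hi, hie]⟩
      rw [Nat.testBit_two_pow_sub_one]
      simpa using (by omega : i < k)
    · rintro ⟨i, hi, -, h3⟩
      rw [← h3]
      exact pvGetD_mem vN i hi
  have hmoge1 : 1 ≤ pvMaskOf verts := by
    by_contra h
    have h0 : pvMaskOf verts = 0 := by omega
    have ht := hmot (vN.getD 0 0)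
    rw [h0] at ht
    simp only [Nat.zero_testBit] at ht
    exact (by simpa using ht.symm : ¬(vN.getD 0 0 ∈ vN)) (pvGetD_mem vN 0 hk1')
  have hmolt : pvMaskOf verts < 2 ^ pN := by
    unfold pvMaskOf
    simp only [pvShiftOne]
    rw [hfold]
    exact pvFoldOrLt pN vN 0 (Nat.two_pow_pos pN) hltN
  have hmolow : pvLowBit (pvMaskOf verts) = vN.getD 0 0 := by
    apply pvLowBit_eq
    · rw [hmot]
      simpa using pvGetD_mem vN 0 hk1'
    · intro i hi
      rw [hmot]
      have hnm : i ∉ vN := by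
        intro hmemi
        obtain ⟨j, hj, hje⟩ := List.mem_iff_getElem.mp hmemi
        rcases Nat.eq_zero_or_pos j with hj0 | hj0
        · subst hj0
          rw [pvGetDEl vN 0 0 hk1'] at hi
          omega
        · have hmono := pvVN_mono vN hso 0 j hj0 hj
          rw [pvGetDEl vN 0 j hj, hje] at hmono
          omega
      simpa using hnm
  have hdpB : ∀ x, dp.getD (pvMaskOf verts, x) 0 = pvMB A pN (2 ^ pN - 1) (pvMaskOf verts) x :=
    fun x => pvDPB A pN (2 ^ pN - 1) (le_refl _) (pvMaskOf verts) x
  have hval : ∀ i, i + 1 < k →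
      dp.getD (pvMaskOf verts, vN.getD (i + 1) 0) 0
        = pvG (pvAdjB A) pN (vN.getD 0 0) (pvMaskOf verts) (vN.getD (i + 1) 0) := by
    intro i hi
    have hi' : i + 1 < vN.length := by omega
    have htb : (pvMaskOf verts).testBit (vN.getD (i + 1) 0) = true := by
      rw [hmot]
      simpa using pvGetD_mem vN (i + 1) hi'
    rw [hdpB, pvMB, hmolow, if_pos]
    right
    refine ⟨?_, hltN _ (pvGetD_mem vN (i + 1) hi'), htb, ?_⟩
    · intro he
      have := pvVN_inj vN hso (i + 1) 0 hi' hk1' he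
      omega
    · have := pvXorLt (pvMaskOf verts) (vN.getD (i + 1) 0) htb
      omega
  -- now the two sums
  rw [pvCountHam_eq A verts hk3]
  have hrange : List.range k = 0 :: (List.range (k - 1)).map (fun i => i + 1) := by
    rw [show k = (k - 1) + 1 from by omega, List.range_succ_eq_map]
    rfl
  rw [hrange, List.map_cons, List.sum_cons,
    if_neg (by simp), zero_add, List.map_map]
  -- right-hand side
  show _ = pvCloseSum A dp verts
  rw [show pvCloseSum A dp verts
      = (verts.drop 1).foldl
          (fun n v => if pvEntry A v (verts.getD 0 0) ≠ 0
            then n + dp.getD (pvMaskOf verts, v.toNat) 0 else n) 0 from rfl,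
    pvFoldIfAdd, zero_add, pvMapRangeI, List.length_drop]
  apply congrArg
  apply List.map_congr_left
  intro i hi
  rw [List.mem_range] at hi
  have hik : i + 1 < k := by omega
  have hdrop : (verts.drop 1).getD i 0 = verts.getD (i + 1) 0 := by
    rw [pvGetDEl (verts.drop 1) 0 i (by rw [List.length_drop]; omega),
      pvGetDEl verts 0 (i + 1) hik, List.getElem_drop]
    congr 1
    omega
  simp only [Function.comp]
  rw [hdrop]
  have htoNat : (verts.getD (i + 1) 0).toNat = vN.getD (i + 1) 0 := (hvNget (i + 1) hik).symm
  have hGeq : pvG (pvAdjA A verts) k 0 (2 ^ k - 1) (i + 1)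
      = pvG (pvAdjB A) pN (vN.getD 0 0) (pvMaskOf verts) (vN.getD (i + 1) 0) := by
    rw [pvG_congr (pvAdjA A verts) (fun u w => pvAdjB A (vN.getD u 0) (vN.getD w 0)) k 0
        hadj (2 ^ k - 1) (i + 1) hik]
    rw [show pvG (fun u w => pvAdjB A (vN.getD u 0) (vN.getD w 0)) k 0 (2 ^ k - 1) (i + 1)
        = pvG (fun u w => pvAdjB A (vN.getD u 0) (vN.getD w 0)) vN.length 0 (2 ^ vN.length - 1) (i + 1) from by rw [hlenv]]
    rw [pvBridge A vN pN hso hltN (2 ^ vN.length - 1)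
      (by have := Nat.two_pow_pos vN.length; omega) (i + 1) (by omega)]
    rw [hlenv, ← hmoMapM]
  by_cases hP : pvEntry A (verts.getD (i + 1) 0) (verts.getD 0 0) ≠ 0
  · have hbool : pvAdjA A verts (i + 1) 0 = true := by
      unfold pvAdjA
      simpa using hP
    rw [if_pos (by rw [hbool]; simp), if_pos hP, htoNat, hval i hik, hGeq]
  · have hbool : pvAdjA A verts (i + 1) 0 = false := by
      unfold pvAdjA
      simpa using hP
    rw [if_neg (by rw [hbool]; simp), if_neg hP]

theorem pvMain (A : List (List Int)) (p : Int) :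
    enumerate_cycles A p = enumerate_cycles_alt A p := by
  by_cases hp : p < 3
  · rw [enumerate_cycles, enumerate_cycles_alt, if_pos hp]
    have hempty : PySem.List.pyRange 3 (p + 1) 2 = [] := by
      apply List.eq_nil_iff_forall_not_mem.mpr
      intro x hx
      have h := (PySem.List.mem_pyRange_iff_of_pos (show (0:Int) < 2 by norm_num) x).mp hx
      omega
    rw [hempty]
    rfl
  · have hp3 : 3 ≤ p := by omega
    simp only [enumerate_cycles, enumerate_cycles_alt, if_neg hp]
    apply PySem.List.foldl_congr_mem
    intro acc kk hkk
    have hkmem := (PySem.List.mem_pyRange_iff_of_pos (show (0:Int) < 2 by norm_num) kk).mp hkk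
    apply PySem.List.foldl_congr_mem
    intro acc2 subset hsubmem
    obtain ⟨hsub, hlen⟩ := (PySem.List.mem_combinations_iff ..).mp hsubmem
    rw [PySem.List.pyRepeat_singleton]
    by_cases hk3 : kk = 3
    · have hlen3 : subset.length = 3 := by rw [hlen, hk3]; rfl
      rw [count_ham_cycles, if_pos hlen3, if_pos hk3]
    · have hcnt : count_ham_cycles A subset =
          pvCloseSum A
            ((List.range' 1 (2 ^ p.toNat - 1)).foldl (fun dp mask => pvAltMask A p.toNat mask dp)
              ((List.range p.toNat).foldl (fun d s => d.insert ((1 <<< s : Nat), s) (1 : Int))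
                (PySem.Dict.empty : PySem.Dict (Nat × Nat) Int))) subset :=
        pvSubsetEq A p subset hsub (by rw [hlen]; omega) (by rw [hlen]; omega)
      rw [hcnt, if_neg hk3]

-- ===== VERDICT (by name: the statement is the Claim_ definition above) =====
theorem enumerate_cycles_spec : Claim_equal_enumerate_cycles := by
  intro A p _ _
  exact pvMain A p
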